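-- pv_equiv track=rewrite | github.com/qodhrkawk/Algorithm_Practice | 2021/3/20/2.py | solution
-- ===== SOURCE A (Python) =====
-- def solution(inp_str):
--     answer = []
--
--     special = '~!@#$%^&*'
--
--     # number 1
--     if len(inp_str) < 8 or len(inp_str) > 15 :
--         answer.append(1)
--
--     ascArr = [0 for _ in range(128)]
--
--     rules = [0,0,0,0]
--     prev = ''
--     prevCount = 1
--     for s in inp_str :
--         ascArr[ord(s)] += 1
--         if ascArr[ord(s)] >= 5 :
--             if 5 not in answer:
--                 answer.append(5)
--
--         if prev == '' :
--             prev = s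
--         else :
--             if prev == s :
--                 prevCount += 1
--                 if prevCount >= 4 :
--                     if 4 not in answer :
--                         answer.append(4)
--             else :
--                 prev = s
--                 prevCount = 1
--
--         if 48<= ord(s) <= 57 :
--             rules[2] += 1
--         elif 65 <= ord(s) <= 90 :
--             rules[0] += 1
--         elif 97 <= ord(s) <= 122 :
--             rules[1] += 1
--         elif s in special :
--             rules[3] += 1
--         else :
--             if 2 not in answer :
--                 answer.append(2)
--
--     # number 3
--     count = 0
--     for i in range(4) :
--         if rules[i] > 0 :
--             count += 1
--     if count < 3 :
--         answer.append(3)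
--
--     answer = sorted(answer)
--
--     if len(answer) == 0 :
--         answer.append(0)
--
--
--
--     return answer
-- ===== SOURCE B (Python) =====
-- def solution(inp_str):
--     special = '~!@#$%^&*'
--     broken = set()
--     # rule 1: length
--     if len(inp_str) < 8 or len(inp_str) > 15:
--         broken.add(1)
--     # rule 5: some character occurring 5 or more times (ord-indexed table)
--     freq = [0] * 128
--     for c in inp_str:
--         freq[ord(c)] += 1
--     if any(f >= 5 for f in freq):
--         broken.add(5)
--     # rule 4: a run of 4 or more equal consecutive characters
--     run = 1
--     for prev, cur in zip(inp_str, inp_str[1:]):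
--         run = run + 1 if cur == prev else 1
--         if run >= 4:
--             broken.add(4)
--     # rules 2 and 3: character classes
--     classes = set()
--     for c in inp_str:
--         if '0' <= c <= '9':
--             classes.add('digit')
--         elif 'A' <= c <= 'Z':
--             classes.add('upper')
--         elif 'a' <= c <= 'z':
--             classes.add('lower')
--         elif c in special:
--             classes.add('special')
--         else:
--             broken.add(2)
--     if len(classes) < 3:
--         broken.add(3)
--     return sorted(broken) or [0]
-- ===== Notes on version B (the rewrite author's own statement) =====
-- stated objective: simpler
-- what changed: A's single fused loop with ordered list appends, prev/prevCount run tracking and a rules counter array is replaced by independent per-rule passes (length test, ord-indexed frequency table, adjacent-pair run scan, one classification pass collecting the present classes in a set) whose triggered rule numbers are collected in a set and sorted at the end.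
import Mathlib
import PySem

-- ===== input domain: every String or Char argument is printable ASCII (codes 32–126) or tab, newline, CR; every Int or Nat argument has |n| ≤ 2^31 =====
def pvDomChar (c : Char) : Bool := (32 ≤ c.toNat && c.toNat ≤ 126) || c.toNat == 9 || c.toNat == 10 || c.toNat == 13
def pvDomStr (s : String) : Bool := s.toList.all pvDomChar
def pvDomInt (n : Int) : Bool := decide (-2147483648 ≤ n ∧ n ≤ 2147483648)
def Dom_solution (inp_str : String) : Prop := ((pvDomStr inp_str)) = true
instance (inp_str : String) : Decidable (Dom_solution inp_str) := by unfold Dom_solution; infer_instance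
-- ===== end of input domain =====

-- B re-implements the fused validation loop as independent single-rule passes collected in a set; equal return value on Dom, no speed claim.

-- ===== PORT A =====
-- shared helper: `arr[i] += 1` on an ord-indexed table (both Pythons use this statement)
def incAt (l : List Int) (i : Nat) : List Int := l.set i (l.getD i 0 + 1)

-- special characters string of A
def specialChars : List Char := "~!@#$%^&*".toList

structure AState where
  answer : List Int
  asc : List Int
  rules : List Int
  prev : Option Char
  prevCount : Int

-- A's loop body, statement group by statement group:
-- `ascArr[ord(s)] += 1; if ascArr[ord(s)] >= 5: if 5 not in answer: answer.append(5)`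
def stepFive (asc : List Int) (i : Nat) (answer : List Int) : List Int :=
  if asc.getD i 0 ≥ 5 then
    if 5 ∈ answer then answer else answer ++ [5]
  else answer

-- the `prev`/`prevCount` bookkeeping and the rule-4 append
def stepPrev (prev : Option Char) (prevCount : Int) (c : Char) (answer : List Int) :
    Option Char × Int × List Int :=
  match prev with
  | none => (some c, prevCount, answer)
  | some p =>
    if p = c then
      (some p, prevCount + 1,
        if prevCount + 1 ≥ 4 then (if 4 ∈ answer then answer else answer ++ [4]) else answer)
    else (some c, (1 : Int), answer)

-- the `rules` classification chain and the rule-2 append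
def stepRules (rules : List Int) (c : Char) (answer : List Int) : List Int × List Int :=
  if 48 ≤ c.toNat ∧ c.toNat ≤ 57 then (incAt rules 2, answer)
  else if 65 ≤ c.toNat ∧ c.toNat ≤ 90 then (incAt rules 0, answer)
  else if 97 ≤ c.toNat ∧ c.toNat ≤ 122 then (incAt rules 1, answer)
  else if specialChars.contains c then (incAt rules 3, answer)
  else (rules, if 2 ∈ answer then answer else answer ++ [2])

-- one iteration of A's fused `for s in inp_str` loop
def stepA (st : AState) (c : Char) : AState :=
  let asc := incAt st.asc c.toNat
  let answer := stepFive asc c.toNat st.answer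
  let pca := stepPrev st.prev st.prevCount c answer
  let ra := stepRules st.rules c pca.2.2
  ⟨ra.2, asc, ra.1, pca.1, pca.2.1⟩

def solution (inp_str : String) : List Int :=
  let cs := inp_str.toList
  let answer0 : List Int := if cs.length < 8 ∨ cs.length > 15 then [1] else []
  let st := cs.foldl stepA ⟨answer0, List.replicate 128 0, [0, 0, 0, 0], none, 1⟩
  let count := ((List.range 4).filter (fun i => st.rules.getD i 0 > 0)).length
  let answer1 := if count < 3 then st.answer ++ [3] else st.answer
  let answer2 := PySem.List.sorted answer1 (fun x => x) false
  if answer2.length = 0 then answer2 ++ [0] else answer2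

-- ===== PORT B =====
-- rule-4 pass of B: `run = run+1 if cur==prev else 1; if run >= 4: broken.add(4)`
def runStep (st : Int × PySem.Set Int) (pc : Char × Char) : Int × PySem.Set Int :=
  let run := if pc.2 = pc.1 then st.1 + 1 else 1
  (run, if run ≥ 4 then st.2.add 4 else st.2)

-- rules-2/3 pass of B: classify one character
def classStep (st : PySem.Set String × PySem.Set Int) (c : Char) : PySem.Set String × PySem.Set Int :=
  if '0' ≤ c ∧ c ≤ '9' then (st.1.add "digit", st.2)
  else if 'A' ≤ c ∧ c ≤ 'Z' then (st.1.add "upper", st.2)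
  else if 'a' ≤ c ∧ c ≤ 'z' then (st.1.add "lower", st.2)
  else if specialChars.contains c then (st.1.add "special", st.2)
  else (st.1, st.2.add 2)

def solution_alt (inp_str : String) : List Int :=
  let cs := inp_str.toList
  let b1 : PySem.Set Int :=
    if cs.length < 8 ∨ cs.length > 15 then (PySem.Set.empty).add 1 else PySem.Set.empty
  let freq := cs.foldl (fun a c => incAt a c.toNat) (List.replicate 128 0)
  let b5 := if freq.any (fun f => decide (f ≥ 5)) then b1.add 5 else b1
  let b4 := ((cs.zip cs.tail).foldl runStep (1, b5)).2
  let cl := cs.foldl classStep (PySem.Set.empty, b4)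
  let b3 := if cl.1.length < 3 then cl.2.add 3 else cl.2
  let lst := PySem.List.sorted b3 (fun x => x) false
  if lst = [] then [0] else lst

-- ===== PRECONDITION & SPEC =====
def Spec_solution (inp_str : String) (out : List Int) : Prop := out = solution_alt inp_str
instance (inp_str : String) (out : List Int) : Decidable (Spec_solution inp_str out) := by unfold Spec_solution; infer_instance

-- ===== CLAIM (what is proved, stated in full; the proofs are below) =====
def Claim_equal_solution : Prop := ∀ (inp_str : String), Dom_solution inp_str → Spec_solution inp_str (solution inp_str)

-- ===== LEMMAS AND PROOFS =====

-- class-membership tests as plain Bool predicates (A's ord ranges)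
def dD (c : Char) : Bool := decide (48 ≤ c.toNat ∧ c.toNat ≤ 57)
def dU (c : Char) : Bool := decide (65 ≤ c.toNat ∧ c.toNat ≤ 90)
def dL (c : Char) : Bool := decide (97 ≤ c.toNat ∧ c.toNat ≤ 122)
def dS (c : Char) : Bool := specialChars.contains c
def nonClass (c : Char) : Bool := !(dD c || dU c || dL c || dS c)

-- reference quantities both programs compute
def freqF (cs : List Char) : List Int :=
  cs.foldl (fun a c => incAt a c.toNat) (List.replicate 128 0)
def fiveF (cs : List Char) : Bool := (freqF cs).any (fun f => decide (f ≥ 5))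
def runPure (st : Int × Bool) (pc : Char × Char) : Int × Bool :=
  ((if pc.2 = pc.1 then st.1 + 1 else 1),
    st.2 || decide ((if pc.2 = pc.1 then st.1 + 1 else 1) ≥ 4))
def runInfo (cs : List Char) : Int × Bool := (cs.zip cs.tail).foldl runPure (1, false)
def iCnt (cs : List Char) (p : Char → Bool) : Int := (cs.countP p : Int)
def rulesF (cs : List Char) : List Int := [iCnt cs dU, iCnt cs dL, iCnt cs dD, iCnt cs dS]
def clsCanon (cs : List Char) : List String :=
  (if cs.any dD then ["digit"] else []) ++ (if cs.any dU then ["upper"] else []) ++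
  (if cs.any dL then ["lower"] else []) ++ (if cs.any dS then ["special"] else [])
def canon (cs : List Char) : List Int :=
  (if cs.length < 8 ∨ cs.length > 15 then [1] else []) ++
  (if cs.any nonClass then [2] else []) ++
  (if (clsCanon cs).length < 3 then [3] else []) ++
  (if (runInfo cs).2 then [4] else []) ++
  (if fiveF cs then [5] else [])

-- the loop invariant of A's fused loop, stated against the reference quantities
def InvA (a0 : List Int) (cs : List Char) (st : AState) : Prop :=
  st.asc = freqF cs ∧
  st.rules = rulesF cs ∧
  st.prev = cs.getLast? ∧
  st.prevCount = (runInfo cs).1 ∧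
  st.answer.Nodup ∧
  (∀ x : Int, x ∈ st.answer ↔ x ∈ a0 ∨ (x = 5 ∧ fiveF cs = true) ∨
      (x = 4 ∧ (runInfo cs).2 = true) ∨ (x = 2 ∧ cs.any nonClass = true))

lemma dS_vals (c : Char) (h : dS c = true) :
    c.toNat = 126 ∨ c.toNat = 33 ∨ c.toNat = 64 ∨ c.toNat = 35 ∨ c.toNat = 36 ∨
    c.toNat = 37 ∨ c.toNat = 94 ∨ c.toNat = 38 ∨ c.toNat = 42 := by
  have e : specialChars = ['~','!','@','#','$','%','^','&','*'] := rfl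
  rw [dS, e] at h
  simp only [List.contains_eq_mem, List.mem_cons, List.not_mem_nil, or_false,
    decide_eq_true_eq] at h
  rcases h with rfl|rfl|rfl|rfl|rfl|rfl|rfl|rfl|rfl <;> decide

lemma dD_excl (c : Char) (h : dD c = true) : dU c = false ∧ dL c = false ∧ dS c = false := by
  rw [dD, decide_eq_true_eq] at h
  refine ⟨by rw [dU, decide_eq_false_iff_not]; omega, by rw [dL, decide_eq_false_iff_not]; omega, ?_⟩
  rcases (dS c).eq_false_or_eq_true with hS|hS
  · have := dS_vals c hS
    omega
  · exact hS

lemma dU_excl (c : Char) (h : dU c = true) : dD c = false ∧ dL c = false ∧ dS c = false := by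
  rw [dU, decide_eq_true_eq] at h
  refine ⟨by rw [dD, decide_eq_false_iff_not]; omega, by rw [dL, decide_eq_false_iff_not]; omega, ?_⟩
  rcases (dS c).eq_false_or_eq_true with hS|hS
  · have := dS_vals c hS
    omega
  · exact hS

lemma dL_excl (c : Char) (h : dL c = true) : dD c = false ∧ dU c = false ∧ dS c = false := by
  rw [dL, decide_eq_true_eq] at h
  refine ⟨by rw [dD, decide_eq_false_iff_not]; omega, by rw [dU, decide_eq_false_iff_not]; omega, ?_⟩
  rcases (dS c).eq_false_or_eq_true with hS|hS
  · have := dS_vals c hS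
    omega
  · exact hS

lemma dS_excl (c : Char) (h : dS c = true) : dD c = false ∧ dU c = false ∧ dL c = false := by
  have := dS_vals c h
  exact ⟨by rw [dD, decide_eq_false_iff_not]; omega,
         by rw [dU, decide_eq_false_iff_not]; omega,
         by rw [dL, decide_eq_false_iff_not]; omega⟩

lemma charLe_digit (c : Char) : ('0' ≤ c ∧ c ≤ '9') ↔ (48 ≤ c.toNat ∧ c.toNat ≤ 57) := by
  simp only [Char.le_def, UInt32.le_iff_toNat_le]
  exact Iff.rfl

lemma charLe_upper (c : Char) : ('A' ≤ c ∧ c ≤ 'Z') ↔ (65 ≤ c.toNat ∧ c.toNat ≤ 90) := by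
  simp only [Char.le_def, UInt32.le_iff_toNat_le]
  exact Iff.rfl

lemma charLe_lower (c : Char) : ('a' ≤ c ∧ c ≤ 'z') ↔ (97 ≤ c.toNat ∧ c.toNat ≤ 122) := by
  simp only [Char.le_def, UInt32.le_iff_toNat_le]
  exact Iff.rfl

lemma freq_len (cs : List Char) (a : List Int) :
    (cs.foldl (fun a c => incAt a c.toNat) a).length = a.length := by
  induction cs generalizing a with
  | nil => rfl
  | cons c t ih =>
    rw [List.foldl_cons, ih]
    simp [incAt]

lemma freqF_append (cs : List Char) (c : Char) :
    freqF (cs ++ [c]) = incAt (freqF cs) c.toNat := by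
  simp [freqF, List.foldl_append]

lemma incAt_any5 (l : List Int) (i : Nat) (hi : i < l.length) :
    ((incAt l i).any (fun f => decide (f ≥ 5))) =
      (l.any (fun f => decide (f ≥ 5)) || decide ((incAt l i).getD i 0 ≥ 5)) := by
  have hv : (incAt l i).getD i 0 = l.getD i 0 + 1 := by
    simp [incAt, List.getD, List.getElem?_set_self, hi]
  have hgd : l.getD i 0 = l[i]'hi := by
    simp [List.getD, List.getElem?_eq_getElem hi]
  rw [Bool.eq_iff_iff]
  simp only [List.any_eq_true, Bool.or_eq_true, decide_eq_true_eq]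
  constructor
  · rintro ⟨x, hx, h5⟩
    obtain ⟨j, hj, hxe⟩ := List.mem_iff_getElem.mp hx
    have hj' : j < l.length := by simpa [incAt] using hj
    by_cases hij : i = j
    · subst hij
      right
      rw [hv, hgd]
      have : (incAt l i)[i]'hj = l[i]'hi + 1 := by
        simp [incAt, List.getD, List.getElem?_eq_getElem hi]
      omega
    · left
      refine ⟨l[j]'hj', List.getElem_mem hj', ?_⟩
      have : (incAt l i)[j]'hj = l[j]'hj' := by
        simp [incAt, List.getElem_set_ne hij]
      rw [← this, hxe]
      exact h5
  · rintro (⟨x, hx, h5⟩ | h5)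
    · obtain ⟨j, hj, hxe⟩ := List.mem_iff_getElem.mp hx
      have hj2 : j < (incAt l i).length := by simpa [incAt] using hj
      by_cases hij : i = j
      · subst hij
        refine ⟨(incAt l i)[i]'hj2, List.getElem_mem hj2, ?_⟩
        have : (incAt l i)[i]'hj2 = l[i]'hi + 1 := by
          simp [incAt, List.getD, List.getElem?_eq_getElem hi]
        rw [this]
        subst hxe
        omega
      · refine ⟨(incAt l i)[j]'hj2, List.getElem_mem hj2, ?_⟩
        have : (incAt l i)[j]'hj2 = l[j]'hj := by
          simp [incAt, List.getElem_set_ne hij]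
        rw [this, hxe]
        exact h5
    · have hi2 : i < (incAt l i).length := by simpa [incAt] using hi
      refine ⟨(incAt l i)[i]'hi2, List.getElem_mem hi2, ?_⟩
      have : (incAt l i)[i]'hi2 = (incAt l i).getD i 0 := by
        simp [List.getD, List.getElem?_eq_getElem hi2]
      rw [this]
      exact h5

lemma zipTail_append (cs : List Char) (d c : Char) (h : cs.getLast? = some d) :
    ((cs ++ [c]).zip (cs ++ [c]).tail) = cs.zip cs.tail ++ [(d, c)] := by
  induction cs with
  | nil => simp at h
  | cons a t ih =>
    cases t with
    | nil => simp_all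
    | cons b u =>
      rw [List.getLast?_cons_cons] at h
      have := ih h
      simp only [List.cons_append, List.tail_cons, List.zip_cons_cons] at this ⊢
      rw [this]

lemma runInfo_append (cs : List Char) (d c : Char) (h : cs.getLast? = some d) :
    runInfo (cs ++ [c]) = runPure (runInfo cs) (d, c) := by
  rw [runInfo, zipTail_append cs d c h, List.foldl_append]
  rfl

lemma condAppend_mem (ans : List Int) (v x : Int) (C : Prop) [Decidable C] :
    (x ∈ (if C then (if v ∈ ans then ans else ans ++ [v]) else ans)) ↔
      (x ∈ ans ∨ (x = v ∧ C)) := by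
  split_ifs with h1 h2
  · constructor
    · exact fun hx => Or.inl hx
    · rintro (hx | ⟨rfl, -⟩)
      · exact hx
      · exact h2
  · simp [h1]
  · simp [h1]

lemma condAppend_nodup (ans : List Int) (v : Int) (C : Prop) [Decidable C]
    (h : ans.Nodup) :
    (if C then (if v ∈ ans then ans else ans ++ [v]) else ans).Nodup := by
  split_ifs with h1 h2
  · exact h
  · simp only [List.nodup_append, List.nodup_singleton, true_and]
    refine ⟨h, ?_⟩
    intro a ha e he
    simp only [List.mem_singleton] at he
    subst he
    intro eq
    subst eq
    exact h2 ha
  · exact h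

lemma inv_init (a0 : List Int) (h : a0.Nodup) :
    InvA a0 [] ⟨a0, List.replicate 128 0, [0, 0, 0, 0], none, 1⟩ := by
  refine ⟨rfl, by simp [rulesF, iCnt], rfl, rfl, h, ?_⟩
  intro x
  have h5 : fiveF [] = false := by decide
  simp [h5, runInfo]

lemma app_mem (ans : List Int) (v x : Int) :
    (x ∈ (if v ∈ ans then ans else ans ++ [v])) ↔ x ∈ ans ∨ x = v := by
  have := condAppend_mem ans v x True
  simpa using this

lemma app_nodup (ans : List Int) (v : Int) (h : ans.Nodup) :
    (if v ∈ ans then ans else ans ++ [v]).Nodup := by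
  have := condAppend_nodup ans v True h
  simpa using this

lemma fiveF_append (cs : List Char) (c : Char) (hc : c.toNat < 128) :
    fiveF (cs ++ [c]) =
      (fiveF cs || decide ((incAt (freqF cs) c.toNat).getD c.toNat 0 ≥ 5)) := by
  rw [fiveF, freqF_append, fiveF]
  have hl : c.toNat < (freqF cs).length := by
    rw [freqF, freq_len]
    simpa using hc
  exact incAt_any5 (freqF cs) c.toNat hl

lemma rulesF_append (cs : List Char) (c : Char) :
    rulesF (cs ++ [c]) = [iCnt cs dU + if dU c then 1 else 0,
      iCnt cs dL + if dL c then 1 else 0, iCnt cs dD + if dD c then 1 else 0,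
      iCnt cs dS + if dS c then 1 else 0] := by
  simp [rulesF, iCnt, List.countP_append, List.countP_cons]

lemma stepFive_mem (asc : List Int) (i : Nat) (ans : List Int) (x : Int) :
    x ∈ stepFive asc i ans ↔ x ∈ ans ∨ (x = 5 ∧ asc.getD i 0 ≥ 5) := by
  unfold stepFive
  exact condAppend_mem ans 5 x _

lemma stepFive_nodup (asc : List Int) (i : Nat) (ans : List Int) (h : ans.Nodup) :
    (stepFive asc i ans).Nodup := by
  unfold stepFive
  exact condAppend_nodup ans 5 _ h

lemma class_stage (cs : List Char) (c : Char) (bs : List Int) (a0 : List Int)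
    (hnd : bs.Nodup)
    (hm : ∀ x, x ∈ bs ↔ x ∈ a0 ∨ (x = 5 ∧ fiveF (cs ++ [c]) = true) ∨
        (x = 4 ∧ (runInfo (cs ++ [c])).2 = true) ∨ (x = 2 ∧ cs.any nonClass = true)) :
    (stepRules (rulesF cs) c bs).1 = rulesF (cs ++ [c]) ∧
    (stepRules (rulesF cs) c bs).2.Nodup ∧
    (∀ x, x ∈ (stepRules (rulesF cs) c bs).2 ↔
        x ∈ a0 ∨ (x = 5 ∧ fiveF (cs ++ [c]) = true) ∨
        (x = 4 ∧ (runInfo (cs ++ [c])).2 = true) ∨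
        (x = 2 ∧ (cs ++ [c]).any nonClass = true)) := by
  unfold stepRules
  rw [rulesF_append]
  by_cases h1 : 48 ≤ c.toNat ∧ c.toNat ≤ 57
  · have hD : dD c = true := by rw [dD, decide_eq_true_eq]; exact h1
    obtain ⟨hU, hL, hS⟩ := dD_excl c hD
    have hN : nonClass c = false := by simp [nonClass, hD]
    rw [if_pos h1]
    refine ⟨by simp [rulesF, incAt, hD, hU, hL, hS], hnd, ?_⟩
    intro x
    rw [hm x]
    simp [List.any_append, hN]
  · have hD : dD c = false := by rw [dD, decide_eq_false_iff_not]; exact h1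
    rw [if_neg h1]
    by_cases h2 : 65 ≤ c.toNat ∧ c.toNat ≤ 90
    · have hU : dU c = true := by rw [dU, decide_eq_true_eq]; exact h2
      obtain ⟨-, hL, hS⟩ := dU_excl c hU
      have hN : nonClass c = false := by simp [nonClass, hU]
      rw [if_pos h2]
      refine ⟨by simp [rulesF, incAt, hD, hU, hL, hS], hnd, ?_⟩
      intro x
      rw [hm x]
      simp [List.any_append, hN]
    · have hU : dU c = false := by rw [dU, decide_eq_false_iff_not]; exact h2
      rw [if_neg h2]
      by_cases h3 : 97 ≤ c.toNat ∧ c.toNat ≤ 122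
      · have hL : dL c = true := by rw [dL, decide_eq_true_eq]; exact h3
        obtain ⟨-, -, hS⟩ := dL_excl c hL
        have hN : nonClass c = false := by simp [nonClass, hL]
        rw [if_pos h3]
        refine ⟨by simp [rulesF, incAt, hD, hU, hL, hS], hnd, ?_⟩
        intro x
        rw [hm x]
        simp [List.any_append, hN]
      · have hL : dL c = false := by rw [dL, decide_eq_false_iff_not]; exact h3
        rw [if_neg h3]
        by_cases h4 : specialChars.contains c = true
        · have hS : dS c = true := h4
          have hN : nonClass c = false := by simp [nonClass, hS]
          rw [if_pos h4]
          refine ⟨by simp [rulesF, incAt, hD, hU, hL, hS], hnd, ?_⟩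
          intro x
          rw [hm x]
          simp [List.any_append, hN]
        · have hS : dS c = false := by
            rw [dS]
            simpa using h4
          have hN : nonClass c = true := by simp [nonClass, hD, hU, hL, hS]
          rw [if_neg h4]
          refine ⟨by simp [rulesF, incAt, hD, hU, hL, hS], app_nodup bs 2 hnd, ?_⟩
          intro x
          rw [app_mem]
          have h2mem : (cs ++ [c]).any nonClass = true := by
            simp [List.any_append, hN]
          by_cases hx2 : x = 2
          · subst hx2
            constructor
            · intro _
              exact Or.inr (Or.inr (Or.inr ⟨rfl, h2mem⟩))
            · intro _
              exact Or.inr rfl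
          · rw [hm x]
            simp [hx2, List.any_append]

set_option maxHeartbeats 1000000 in
lemma inv_step (a0 : List Int) (cs : List Char) (st : AState) (c : Char)
    (hc : c.toNat < 128) (h : InvA a0 cs st) : InvA a0 (cs ++ [c]) (stepA st c) := by
  obtain ⟨ans, asc, rules, prev, pcnt⟩ := st
  obtain ⟨hasc, hrules, hprev, hcnt, hnd, hmem⟩ := h
  simp only at hasc hrules hprev hcnt hnd hmem
  subst hasc hrules hprev hcnt
  have hmono : fiveF cs = true → fiveF (cs ++ [c]) = true := by
    rw [fiveF_append cs c hc]
    intro h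
    simp [h]
  have hnd5 := stepFive_nodup (incAt (freqF cs) c.toNat) c.toNat ans hnd
  have h5mem' : ∀ x, x ∈ stepFive (incAt (freqF cs) c.toNat) c.toNat ans ↔
      x ∈ a0 ∨ (x = 5 ∧ fiveF (cs ++ [c]) = true) ∨
        (x = 4 ∧ (runInfo cs).2 = true) ∨ (x = 2 ∧ cs.any nonClass = true) := by
    intro x
    rw [stepFive_mem, fiveF_append cs c hc]
    by_cases hx5 : x = 5
    · subst hx5
      rcases (fiveF cs).eq_false_or_eq_true with h5|h5
      · simp [h5, hmem 5]
      · simp [h5, hmem 5]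
    · simp [hx5, hmem x]
  rcases hlast : cs.getLast? with _ | p
  · -- first character: cs = []
    have hcs : cs = [] := List.getLast?_eq_none_iff.mp hlast
    subst hcs
    have hrun0 : runInfo (([] : List Char) ++ [c]) = runInfo ([] : List Char) := rfl
    have hBmem : ∀ x, x ∈ stepFive (incAt (freqF []) c.toNat) c.toNat ans ↔
        x ∈ a0 ∨ (x = 5 ∧ fiveF ([] ++ [c]) = true) ∨
          (x = 4 ∧ (runInfo ([] ++ [c])).2 = true) ∨
          (x = 2 ∧ ([] : List Char).any nonClass = true) := by
      intro x
      rw [hrun0]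
      exact h5mem' x
    have hcl := class_stage [] c _ a0 hnd5 hBmem
    have hred : stepA ⟨ans, freqF [], rulesF [], none, (runInfo []).1⟩ c =
        ⟨(stepRules (rulesF []) c (stepFive (incAt (freqF []) c.toNat) c.toNat ans)).2,
          incAt (freqF []) c.toNat,
          (stepRules (rulesF []) c (stepFive (incAt (freqF []) c.toNat) c.toNat ans)).1,
          some c, (runInfo ([] : List Char)).1⟩ := rfl
    rw [hred]
    exact ⟨(freqF_append [] c).symm, hcl.1, by simp, rfl, hcl.2.1, hcl.2.2⟩
  · by_cases hpc : p = c
    · subst hpc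
      have hrun : runInfo (cs ++ [p]) =
          ((runInfo cs).1 + 1, (runInfo cs).2 || decide ((runInfo cs).1 + 1 ≥ 4)) := by
        rw [runInfo_append cs p p hlast]
        simp [runPure]
      have hpca : stepPrev (some p) (runInfo cs).1 p
          (stepFive (incAt (freqF cs) p.toNat) p.toNat ans) =
          (some p, (runInfo cs).1 + 1,
            if (runInfo cs).1 + 1 ≥ 4 then
              (if 4 ∈ stepFive (incAt (freqF cs) p.toNat) p.toNat ans then
                stepFive (incAt (freqF cs) p.toNat) p.toNat ans
              else stepFive (incAt (freqF cs) p.toNat) p.toNat ans ++ [4])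
            else stepFive (incAt (freqF cs) p.toNat) p.toNat ans) := by
        simp [stepPrev]
      have hndB : (if (runInfo cs).1 + 1 ≥ 4 then
          (if 4 ∈ stepFive (incAt (freqF cs) p.toNat) p.toNat ans then
            stepFive (incAt (freqF cs) p.toNat) p.toNat ans
          else stepFive (incAt (freqF cs) p.toNat) p.toNat ans ++ [4])
          else stepFive (incAt (freqF cs) p.toNat) p.toNat ans).Nodup :=
        condAppend_nodup _ 4 _ hnd5
      have hBmem : ∀ x, x ∈ (if (runInfo cs).1 + 1 ≥ 4 then
          (if 4 ∈ stepFive (incAt (freqF cs) p.toNat) p.toNat ans then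
            stepFive (incAt (freqF cs) p.toNat) p.toNat ans
          else stepFive (incAt (freqF cs) p.toNat) p.toNat ans ++ [4])
          else stepFive (incAt (freqF cs) p.toNat) p.toNat ans) ↔
          x ∈ a0 ∨ (x = 5 ∧ fiveF (cs ++ [p]) = true) ∨
            (x = 4 ∧ (runInfo (cs ++ [p])).2 = true) ∨
            (x = 2 ∧ cs.any nonClass = true) := by
        intro x
        rw [condAppend_mem, h5mem' x, hrun]
        by_cases hx4 : x = 4
        · subst hx4
          rcases ((runInfo cs).2).eq_false_or_eq_true with h4|h4 <;> simp [h4]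
        · simp [hx4]
      have hcl := class_stage cs p _ a0 hndB hBmem
      have hred : stepA ⟨ans, freqF cs, rulesF cs, some p, (runInfo cs).1⟩ p =
          ⟨(stepRules (rulesF cs) p (stepPrev (some p) (runInfo cs).1 p
              (stepFive (incAt (freqF cs) p.toNat) p.toNat ans)).2.2).2,
            incAt (freqF cs) p.toNat,
            (stepRules (rulesF cs) p (stepPrev (some p) (runInfo cs).1 p
              (stepFive (incAt (freqF cs) p.toNat) p.toNat ans)).2.2).1,
            (stepPrev (some p) (runInfo cs).1 p
              (stepFive (incAt (freqF cs) p.toNat) p.toNat ans)).1,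
            (stepPrev (some p) (runInfo cs).1 p
              (stepFive (incAt (freqF cs) p.toNat) p.toNat ans)).2.1⟩ := rfl
      rw [hred, hpca]
      refine ⟨(freqF_append cs p).symm, hcl.1, by simp, by rw [hrun], hcl.2.1, hcl.2.2⟩
    · have hrun : runInfo (cs ++ [c]) = (1, (runInfo cs).2) := by
        rw [runInfo_append cs p c hlast]
        have hne : ¬ (c = p) := fun e => hpc e.symm
        simp [runPure, hne]
      have hpca : stepPrev (some p) (runInfo cs).1 c
          (stepFive (incAt (freqF cs) c.toNat) c.toNat ans) =
          (some c, (1 : Int), stepFive (incAt (freqF cs) c.toNat) c.toNat ans) := by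
        simp [stepPrev, hpc]
      have hBmem : ∀ x, x ∈ stepFive (incAt (freqF cs) c.toNat) c.toNat ans ↔
          x ∈ a0 ∨ (x = 5 ∧ fiveF (cs ++ [c]) = true) ∨
            (x = 4 ∧ (runInfo (cs ++ [c])).2 = true) ∨
            (x = 2 ∧ cs.any nonClass = true) := by
        intro x
        rw [hrun]
        exact h5mem' x
      have hcl := class_stage cs c _ a0 hnd5 hBmem
      have hred : stepA ⟨ans, freqF cs, rulesF cs, some p, (runInfo cs).1⟩ c =
          ⟨(stepRules (rulesF cs) c (stepPrev (some p) (runInfo cs).1 c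
              (stepFive (incAt (freqF cs) c.toNat) c.toNat ans)).2.2).2,
            incAt (freqF cs) c.toNat,
            (stepRules (rulesF cs) c (stepPrev (some p) (runInfo cs).1 c
              (stepFive (incAt (freqF cs) c.toNat) c.toNat ans)).2.2).1,
            (stepPrev (some p) (runInfo cs).1 c
              (stepFive (incAt (freqF cs) c.toNat) c.toNat ans)).1,
            (stepPrev (some p) (runInfo cs).1 c
              (stepFive (incAt (freqF cs) c.toNat) c.toNat ans)).2.1⟩ := rfl
      rw [hred, hpca]
      refine ⟨(freqF_append cs c).symm, hcl.1, by simp, by rw [hrun], hcl.2.1, hcl.2.2⟩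

lemma inv_fold (rest : List Char) (a0 : List Int) (cs : List Char) (st : AState)
    (hdom : ∀ c ∈ rest, c.toNat < 128) (h : InvA a0 cs st) :
    InvA a0 (cs ++ rest) (rest.foldl stepA st) := by
  induction rest generalizing cs st with
  | nil => simpa using h
  | cons c u ih =>
    have h1 := inv_step a0 cs st c (hdom c (by simp)) h
    have h2 := ih (cs ++ [c]) (stepA st c) (fun x hx => hdom x (by simp [hx])) h1
    simpa [List.append_assoc] using h2

lemma runPure_flag (ps : List (Char × Char)) (r : Int) (b : Bool) :
    ps.foldl runPure (r, b) =
      ((ps.foldl runPure (r, false)).1, b || (ps.foldl runPure (r, false)).2) := by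
  induction ps generalizing r b with
  | nil => simp
  | cons p t ih =>
    simp only [List.foldl_cons, runPure]
    rw [ih, ih (if p.2 = p.1 then r + 1 else 1) (false || _)]
    simp [Bool.or_assoc]

lemma runStep_fold (ps : List (Char × Char)) (r : Int) (s : PySem.Set Int)
    (hs : s.Nodup) :
    (ps.foldl runStep (r, s)).2.Nodup ∧
    (∀ x, x ∈ (ps.foldl runStep (r, s)).2 ↔
        x ∈ s ∨ (x = 4 ∧ (ps.foldl runPure (r, false)).2 = true)) := by
  induction ps generalizing r s with
  | nil =>
    refine ⟨hs, fun x => by simp⟩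
  | cons p t ih =>
    simp only [List.foldl_cons]
    have hstep : runStep (r, s) p =
        ((if p.2 = p.1 then r + 1 else 1),
          if (if p.2 = p.1 then r + 1 else 1) ≥ 4 then s.add 4 else s) := rfl
    have hpure : runPure (r, false) p =
        ((if p.2 = p.1 then r + 1 else 1),
          decide ((if p.2 = p.1 then r + 1 else 1) ≥ 4)) := by
      simp [runPure]
    rw [hstep, hpure]
    set r' := if p.2 = p.1 then r + 1 else 1 with hr'
    obtain ⟨hnd, hmem⟩ := ih r' (if r' ≥ 4 then s.add 4 else s)
      (by split_ifs
          · exact PySem.Set.nodup_add _ _ hs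
          · exact hs)
    refine ⟨hnd, ?_⟩
    intro x
    rw [hmem x, runPure_flag t r' (decide (r' ≥ 4))]
    by_cases h4 : r' ≥ 4 <;> simp [h4, PySem.Set.mem_add] <;> tauto

set_option maxHeartbeats 1000000 in
lemma classStep_fold (cs : List Char) (cl : PySem.Set String) (s : PySem.Set Int)
    (hcl : cl.Nodup) (hs : s.Nodup) :
    (cs.foldl classStep (cl, s)).1.Nodup ∧ (cs.foldl classStep (cl, s)).2.Nodup ∧
    (∀ t, t ∈ (cs.foldl classStep (cl, s)).1 ↔ t ∈ cl ∨
        (t = "digit" ∧ cs.any dD = true) ∨ (t = "upper" ∧ cs.any dU = true) ∨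
        (t = "lower" ∧ cs.any dL = true) ∨ (t = "special" ∧ cs.any dS = true)) ∧
    (∀ x, x ∈ (cs.foldl classStep (cl, s)).2 ↔
        x ∈ s ∨ (x = 2 ∧ cs.any nonClass = true)) := by
  induction cs generalizing cl s with
  | nil =>
    refine ⟨hcl, hs, fun t => by simp, fun x => by simp⟩
  | cons c t ih =>
    simp only [List.foldl_cons]
    by_cases h1 : '0' ≤ c ∧ c ≤ '9'
    · have hD : dD c = true := by rw [dD, decide_eq_true_eq]; exact (charLe_digit c).mp h1
      obtain ⟨hU, hL, hS⟩ := dD_excl c hD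
      have hN : nonClass c = false := by simp [nonClass, hD]
      have hstep : classStep (cl, s) c = (cl.add "digit", s) := by
        simp only [classStep]
        rw [if_pos h1]
      rw [hstep]
      obtain ⟨n1, n2, m1, m2⟩ := ih (cl.add "digit") s (PySem.Set.nodup_add _ _ hcl) hs
      refine ⟨n1, n2, ?_, ?_⟩
      · intro t'
        rw [m1 t']
        simp only [PySem.Set.mem_add, List.any_cons, hD, hU, hL, hS, Bool.true_or,
          Bool.false_or, and_true]
        tauto
      · intro x
        rw [m2 x]
        simp [List.any_cons, hN]
    · by_cases h2 : 'A' ≤ c ∧ c ≤ 'Z'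
      · have hU : dU c = true := by rw [dU, decide_eq_true_eq]; exact (charLe_upper c).mp h2
        obtain ⟨hD, hL, hS⟩ := dU_excl c hU
        have hN : nonClass c = false := by simp [nonClass, hU]
        have hstep : classStep (cl, s) c = (cl.add "upper", s) := by
          simp only [classStep]
          rw [if_neg h1, if_pos h2]
        rw [hstep]
        obtain ⟨n1, n2, m1, m2⟩ := ih (cl.add "upper") s (PySem.Set.nodup_add _ _ hcl) hs
        refine ⟨n1, n2, ?_, ?_⟩
        · intro t'
          rw [m1 t']
          simp only [PySem.Set.mem_add, List.any_cons, hD, hU, hL, hS, Bool.true_or,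
            Bool.false_or, and_true]
          tauto
        · intro x
          rw [m2 x]
          simp [List.any_cons, hN]
      · by_cases h3 : 'a' ≤ c ∧ c ≤ 'z'
        · have hL : dL c = true := by rw [dL, decide_eq_true_eq]; exact (charLe_lower c).mp h3
          obtain ⟨hD, hU, hS⟩ := dL_excl c hL
          have hN : nonClass c = false := by simp [nonClass, hL]
          have hstep : classStep (cl, s) c = (cl.add "lower", s) := by
            simp only [classStep]
            rw [if_neg h1, if_neg h2, if_pos h3]
          rw [hstep]
          obtain ⟨n1, n2, m1, m2⟩ := ih (cl.add "lower") s (PySem.Set.nodup_add _ _ hcl) hs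
          refine ⟨n1, n2, ?_, ?_⟩
          · intro t'
            rw [m1 t']
            simp only [PySem.Set.mem_add, List.any_cons, hD, hU, hL, hS, Bool.true_or,
              Bool.false_or, and_true]
            tauto
          · intro x
            rw [m2 x]
            simp [List.any_cons, hN]
        · by_cases h4 : specialChars.contains c = true
          · have hS : dS c = true := h4
            obtain ⟨hD, hU, hL⟩ := dS_excl c hS
            have hN : nonClass c = false := by simp [nonClass, hS]
            have hstep : classStep (cl, s) c = (cl.add "special", s) := by
              simp only [classStep]
              rw [if_neg h1, if_neg h2, if_neg h3, if_pos h4]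
            rw [hstep]
            obtain ⟨n1, n2, m1, m2⟩ := ih (cl.add "special") s (PySem.Set.nodup_add _ _ hcl) hs
            refine ⟨n1, n2, ?_, ?_⟩
            · intro t'
              rw [m1 t']
              simp only [PySem.Set.mem_add, List.any_cons, hD, hU, hL, hS, Bool.true_or,
                Bool.false_or, and_true]
              tauto
            · intro x
              rw [m2 x]
              simp [List.any_cons, hN]
          · have hD : dD c = false := by
              rw [dD, decide_eq_false_iff_not]
              intro hc
              exact h1 ((charLe_digit c).mpr hc)
            have hU : dU c = false := by
              rw [dU, decide_eq_false_iff_not]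
              intro hc
              exact h2 ((charLe_upper c).mpr hc)
            have hL : dL c = false := by
              rw [dL, decide_eq_false_iff_not]
              intro hc
              exact h3 ((charLe_lower c).mpr hc)
            have hS : dS c = false := by
              rw [dS]
              exact Bool.not_eq_true _ ▸ (by simpa using h4)
            have hN : nonClass c = true := by simp [nonClass, hD, hU, hL, hS]
            have hstep : classStep (cl, s) c = (cl, s.add 2) := by
              simp only [classStep]
              rw [if_neg h1, if_neg h2, if_neg h3, if_neg h4]
            rw [hstep]
            obtain ⟨n1, n2, m1, m2⟩ := ih cl (s.add 2) hcl (PySem.Set.nodup_add _ _ hs)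
            refine ⟨n1, n2, ?_, ?_⟩
            · intro t'
              rw [m1 t']
              simp [List.any_cons, hD, hU, hL, hS]
            · intro x
              rw [m2 x]
              simp only [PySem.Set.mem_add, List.any_cons, hN, Bool.true_or, and_true]
              tauto

lemma clsCanon_nodup (cs : List Char) : (clsCanon cs).Nodup := by
  unfold clsCanon
  split_ifs <;> decide

lemma clsCanon_mem (cs : List Char) (t : String) :
    t ∈ clsCanon cs ↔ (t = "digit" ∧ cs.any dD = true) ∨ (t = "upper" ∧ cs.any dU = true) ∨
      (t = "lower" ∧ cs.any dL = true) ∨ (t = "special" ∧ cs.any dS = true) := by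
  rcases (cs.any dD).eq_false_or_eq_true with hD|hD <;>
    rcases (cs.any dU).eq_false_or_eq_true with hU|hU <;>
      rcases (cs.any dL).eq_false_or_eq_true with hL|hL <;>
        rcases (cs.any dS).eq_false_or_eq_true with hS|hS <;>
          simp [clsCanon, hD, hU, hL, hS]

lemma countA_eq (cs : List Char) :
    ((List.range 4).filter (fun i => (rulesF cs).getD i 0 > 0)).length =
      (clsCanon cs).length := by
  have e : (List.range 4) = [0, 1, 2, 3] := rfl
  rw [e]
  by_cases aU : ∃ x ∈ cs, dU x = true <;> by_cases aL : ∃ x ∈ cs, dL x = true <;>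
    by_cases aD : ∃ x ∈ cs, dD x = true <;> by_cases aS : ∃ x ∈ cs, dS x = true <;>
      simp [List.filter, rulesF, iCnt, clsCanon, aU, aL, aD, aS]

lemma canon_pw (cs : List Char) : (canon cs).Pairwise (fun a b : Int => a < b) := by
  unfold canon
  split_ifs <;> decide

lemma canon_nodup (cs : List Char) : (canon cs).Nodup := by
  unfold canon
  split_ifs <;> decide

lemma canon_mem (cs : List Char) (x : Int) :
    x ∈ canon cs ↔ (x = 1 ∧ (cs.length < 8 ∨ cs.length > 15)) ∨
      (x = 2 ∧ cs.any nonClass = true) ∨ (x = 3 ∧ (clsCanon cs).length < 3) ∨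
      (x = 4 ∧ (runInfo cs).2 = true) ∨ (x = 5 ∧ fiveF cs = true) := by
  rcases (cs.any nonClass).eq_false_or_eq_true with h2|h2 <;>
    rcases ((runInfo cs).2).eq_false_or_eq_true with h4|h4 <;>
      rcases (fiveF cs).eq_false_or_eq_true with h5|h5 <;>
        by_cases h1 : cs.length < 8 ∨ cs.length > 15 <;>
          by_cases h3 : (clsCanon cs).length < 3 <;>
            simp [canon, h1, h2, h3, h4, h5]

lemma sorted_eq_canon (l : List Int) (cs : List Char) (hnd : l.Nodup)
    (hmem : ∀ x, x ∈ l ↔ x ∈ canon cs) :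
    PySem.List.sorted l (fun x => x) false = canon cs := by
  have hperm : (canon cs).Perm l := by
    rw [List.perm_ext_iff_of_nodup (canon_nodup cs) hnd]
    intro x
    exact (hmem x).symm
  exact PySem.List.sorted_eq_of_perm_of_pairwise_lt l (canon cs) (fun x => x) hperm (canon_pw cs)

set_option maxHeartbeats 2000000 in
lemma solution_eq_canon (inp_str : String)
    (hdom : ∀ c ∈ inp_str.toList, c.toNat < 128) :
    solution inp_str = (if canon inp_str.toList = [] then [0] else canon inp_str.toList) := by
  set cs := inp_str.toList with hcs
  set a0 : List Int := if cs.length < 8 ∨ cs.length > 15 then [1] else [] with ha0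
  have ha0nd : a0.Nodup := by
    rw [ha0]
    split_ifs <;> simp
  set st := cs.foldl stepA ⟨a0, List.replicate 128 0, [0, 0, 0, 0], none, 1⟩ with hst
  have hinv : InvA a0 cs st := by
    have := inv_fold cs a0 [] _ hdom (inv_init a0 ha0nd)
    simpa using this
  obtain ⟨hasc, hrules, hprev, hcnt, hnd, hmem⟩ := hinv
  have ha0mem : ∀ x : Int, x ∈ a0 ↔ (x = 1 ∧ (cs.length < 8 ∨ cs.length > 15)) := by
    intro x
    rw [ha0]
    split_ifs with h <;> simp [h]
  have hcount : ((List.range 4).filter (fun i => st.rules.getD i 0 > 0)).length =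
      (clsCanon cs).length := by
    rw [hrules]
    exact countA_eq cs
  have h3n : (3 : Int) ∉ st.answer := by
    intro hx
    have h' := (hmem 3).mp hx
    rw [ha0mem 3] at h'
    simp at h'
  set a1 : List Int := if ((List.range 4).filter (fun i => st.rules.getD i 0 > 0)).length < 3
      then st.answer ++ [3] else st.answer with ha1
  have ha1nd : a1.Nodup := by
    rw [ha1]
    split_ifs
    · simp only [List.nodup_append, List.nodup_singleton, true_and]
      refine ⟨hnd, ?_⟩
      intro a ha e he
      simp only [List.mem_singleton] at he
      subst he
      intro eq
      subst eq
      exact h3n ha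
    · exact hnd
  have ha1mem : ∀ x : Int, x ∈ a1 ↔ x ∈ canon cs := by
    intro x
    rw [ha1, canon_mem]
    split_ifs with h
    · have h' : (clsCanon cs).length < 3 := by rw [← hcount]; exact h
      simp only [List.mem_append, List.mem_singleton]
      rw [hmem x, ha0mem x]
      constructor
      · rintro ((h1|h5|h4|h2)|h3)
        · exact Or.inl h1
        · exact Or.inr (Or.inr (Or.inr (Or.inr h5)))
        · exact Or.inr (Or.inr (Or.inr (Or.inl h4)))
        · exact Or.inr (Or.inl h2)
        · exact Or.inr (Or.inr (Or.inl ⟨h3, h'⟩))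
      · rintro (h1|h2|⟨h3,-⟩|h4|h5)
        · exact Or.inl (Or.inl h1)
        · exact Or.inl (Or.inr (Or.inr (Or.inr h2)))
        · exact Or.inr h3
        · exact Or.inl (Or.inr (Or.inr (Or.inl h4)))
        · exact Or.inl (Or.inr (Or.inl h5))
    · have h' : ¬ (clsCanon cs).length < 3 := by rw [← hcount]; exact h
      rw [hmem x, ha0mem x]
      constructor
      · rintro (h1|h5|h4|h2)
        · exact Or.inl h1
        · exact Or.inr (Or.inr (Or.inr (Or.inr h5)))
        · exact Or.inr (Or.inr (Or.inr (Or.inl h4)))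
        · exact Or.inr (Or.inl h2)
      · rintro (h1|h2|⟨-,h3⟩|h4|h5)
        · exact Or.inl h1
        · exact Or.inr (Or.inr (Or.inr h2))
        · exact absurd h3 h'
        · exact Or.inr (Or.inr (Or.inl h4))
        · exact Or.inr (Or.inl h5)
  have hsorted : PySem.List.sorted a1 (fun x => x) false = canon cs :=
    sorted_eq_canon a1 cs ha1nd ha1mem
  show (if (PySem.List.sorted a1 (fun x => x) false).length = 0 then
      PySem.List.sorted a1 (fun x => x) false ++ [0]
    else PySem.List.sorted a1 (fun x => x) false) = _
  rw [hsorted]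
  cases canon cs with
  | nil => simp
  | cons a t => simp

set_option maxHeartbeats 2000000 in
lemma solution_alt_eq_canon (inp_str : String)
    (hdom : ∀ c ∈ inp_str.toList, c.toNat < 128) :
    solution_alt inp_str = (if canon inp_str.toList = [] then [0] else canon inp_str.toList) := by
  set cs := inp_str.toList with hcs
  set b1 : PySem.Set Int :=
    if cs.length < 8 ∨ cs.length > 15 then (PySem.Set.empty).add 1 else PySem.Set.empty with hb1
  have hb1nd : b1.Nodup := by
    rw [hb1]
    split_ifs
    · exact PySem.Set.nodup_add _ _ List.nodup_nil
    · exact List.nodup_nil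
  have hb1mem : ∀ x : Int, x ∈ b1 ↔ (x = 1 ∧ (cs.length < 8 ∨ cs.length > 15)) := by
    intro x
    rw [hb1]
    split_ifs with h
    · rw [PySem.Set.mem_add]
      simp [PySem.Set.empty, h]
    · simp [PySem.Set.empty, h]
  set b5 : PySem.Set Int := if (cs.foldl (fun a c => incAt a c.toNat)
      (List.replicate 128 0)).any (fun f => decide (f ≥ 5)) then b1.add 5 else b1 with hb5
  have hfive : (cs.foldl (fun a c => incAt a c.toNat)
      (List.replicate 128 0)).any (fun f => decide (f ≥ 5)) = fiveF cs := rfl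
  have hb5nd : b5.Nodup := by
    rw [hb5]
    split_ifs
    · exact PySem.Set.nodup_add _ _ hb1nd
    · exact hb1nd
  have hb5mem : ∀ x : Int, x ∈ b5 ↔ ((x = 1 ∧ (cs.length < 8 ∨ cs.length > 15)) ∨
      (x = 5 ∧ fiveF cs = true)) := by
    intro x
    rw [hb5, hfive]
    split_ifs with h
    · rw [PySem.Set.mem_add, hb1mem x]
      simp [h]
    · rw [hb1mem x]
      simp [Bool.not_eq_true] at h
      simp [h]
  set b4 : PySem.Set Int := ((cs.zip cs.tail).foldl runStep (1, b5)).2 with hb4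
  obtain ⟨hb4nd, hb4mem'⟩ := runStep_fold (cs.zip cs.tail) 1 b5 hb5nd
  have hb4mem : ∀ x : Int, x ∈ b4 ↔ ((x = 1 ∧ (cs.length < 8 ∨ cs.length > 15)) ∨
      (x = 5 ∧ fiveF cs = true) ∨ (x = 4 ∧ (runInfo cs).2 = true)) := by
    intro x
    rw [hb4, hb4mem' x, hb5mem x]
    have hri : ((cs.zip cs.tail).foldl runPure (1, false)).2 = (runInfo cs).2 := rfl
    rw [hri]
    constructor
    · rintro ((h1|h5)|h4)
      · exact Or.inl h1
      · exact Or.inr (Or.inl h5)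
      · exact Or.inr (Or.inr h4)
    · rintro (h1|h5|h4)
      · exact Or.inl (Or.inl h1)
      · exact Or.inl (Or.inr h5)
      · exact Or.inr h4
  obtain ⟨hclnd, hb2nd, hclmem, hb2mem⟩ :=
    classStep_fold cs PySem.Set.empty b4 List.nodup_nil hb4nd
  have hb2mem' : ∀ x : Int, x ∈ (cs.foldl classStep (PySem.Set.empty, b4)).2 ↔
      ((x = 1 ∧ (cs.length < 8 ∨ cs.length > 15)) ∨ (x = 5 ∧ fiveF cs = true) ∨
        (x = 4 ∧ (runInfo cs).2 = true) ∨ (x = 2 ∧ cs.any nonClass = true)) := by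
    intro x
    rw [hb2mem x, hb4mem x]
    constructor
    · rintro ((h1|h5|h4)|h2)
      · exact Or.inl h1
      · exact Or.inr (Or.inl h5)
      · exact Or.inr (Or.inr (Or.inl h4))
      · exact Or.inr (Or.inr (Or.inr h2))
    · rintro (h1|h5|h4|h2)
      · exact Or.inl (Or.inl h1)
      · exact Or.inl (Or.inr (Or.inl h5))
      · exact Or.inl (Or.inr (Or.inr h4))
      · exact Or.inr h2
  have hlen : (cs.foldl classStep (PySem.Set.empty, b4)).1.length = (clsCanon cs).length := by
    refine List.Perm.length_eq ?_
    rw [List.perm_ext_iff_of_nodup hclnd (clsCanon_nodup cs)]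
    intro t
    rw [hclmem t, clsCanon_mem]
    simp [PySem.Set.empty]
  set b3 : PySem.Set Int := if (cs.foldl classStep (PySem.Set.empty, b4)).1.length < 3 then
      (cs.foldl classStep (PySem.Set.empty, b4)).2.add 3
    else (cs.foldl classStep (PySem.Set.empty, b4)).2 with hb3
  have hb3nd : b3.Nodup := by
    rw [hb3]
    split_ifs
    · exact PySem.Set.nodup_add _ _ hb2nd
    · exact hb2nd
  have hb3mem : ∀ x : Int, x ∈ b3 ↔ x ∈ canon cs := by
    intro x
    rw [hb3, canon_mem]
    split_ifs with h
    · have h' : (clsCanon cs).length < 3 := by rw [← hlen]; exact h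
      rw [PySem.Set.mem_add, hb2mem' x]
      constructor
      · rintro ((h1|h5|h4|h2)|h3)
        · exact Or.inl h1
        · exact Or.inr (Or.inr (Or.inr (Or.inr h5)))
        · exact Or.inr (Or.inr (Or.inr (Or.inl h4)))
        · exact Or.inr (Or.inl h2)
        · exact Or.inr (Or.inr (Or.inl ⟨h3, h'⟩))
      · rintro (h1|h2|⟨h3,-⟩|h4|h5)
        · exact Or.inl (Or.inl h1)
        · exact Or.inl (Or.inr (Or.inr (Or.inr h2)))
        · exact Or.inr h3
        · exact Or.inl (Or.inr (Or.inr (Or.inl h4)))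
        · exact Or.inl (Or.inr (Or.inl h5))
    · have h' : ¬ (clsCanon cs).length < 3 := by rw [← hlen]; exact h
      rw [hb2mem' x]
      constructor
      · rintro (h1|h5|h4|h2)
        · exact Or.inl h1
        · exact Or.inr (Or.inr (Or.inr (Or.inr h5)))
        · exact Or.inr (Or.inr (Or.inr (Or.inl h4)))
        · exact Or.inr (Or.inl h2)
      · rintro (h1|h2|⟨-,h3⟩|h4|h5)
        · exact Or.inl h1
        · exact Or.inr (Or.inr (Or.inr h2))
        · exact absurd h3 h'
        · exact Or.inr (Or.inr (Or.inl h4))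
        · exact Or.inr (Or.inl h5)
  have hsorted : PySem.List.sorted b3 (fun x => x) false = canon cs :=
    sorted_eq_canon b3 cs hb3nd hb3mem
  show (if PySem.List.sorted b3 (fun x => x) false = [] then [0]
    else PySem.List.sorted b3 (fun x => x) false) = _
  rw [hsorted]

lemma dom_toNat (inp_str : String) (h : Dom_solution inp_str) :
    ∀ c ∈ inp_str.toList, c.toNat < 128 := by
  intro c hc
  rw [Dom_solution, pvDomStr, List.all_eq_true] at h
  have := h c hc
  rw [pvDomChar] at this
  simp only [Bool.or_eq_true, Bool.and_eq_true, decide_eq_true_eq, beq_iff_eq] at this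
  omega

-- ===== VERDICT (by name: the statement is the Claim_ definition above) =====
theorem solution_spec : Claim_equal_solution := by
  intro inp_str hdom
  unfold Spec_solution
  rw [solution_eq_canon inp_str (dom_toNat inp_str hdom),
      solution_alt_eq_canon inp_str (dom_toNat inp_str hdom)]
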